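-- pv_equiv track=rewrite | github.com/ravikumarvj/DS-and-algorithms | strings/inplace_mod.py | in_place_mod
-- ===== SOURCE A (Python) =====
-- def in_place_mod(string):  # delete string[i] is O(N) operation
--     i = 0
--     while i < len(string):
--         if string[i] == 'c':
--             del string[i]
--             if i-1 >= 0 and string[i-1] == 'a':
--                 i -= 1
--         elif i+1 < len(string) and string[i] == 'a' and string[i+1] == 'b':
--             del string[i + 1]  # First delete string i+1
--             del string[i]
--
--             if i-1 >= 0 and string[i-1] == 'a':
--                 i -= 1
--         else:
--             i += 1
--     return string
-- ===== SOURCE B (Python) =====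
-- def in_place_mod(string):
--     # Single-pass stack reduction: skip 'c', pop a preceding 'a' when 'b' arrives.
--     out = []
--     for ch in string:
--         if ch == 'c':
--             continue
--         if ch == 'b' and out and out[-1] == 'a':
--             out.pop()
--         else:
--             out.append(ch)
--     string[:] = out
--     return string
-- ===== Notes on version B (the rewrite author's own statement) =====
-- stated objective: faster
-- what changed: Replaces the index-juggling while loop with repeated O(N) in-place deletions and one-step backtracking by a single left-to-right pass over a stack (skip 'c', pop a trailing 'a' when 'b' arrives).
import Mathlib
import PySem

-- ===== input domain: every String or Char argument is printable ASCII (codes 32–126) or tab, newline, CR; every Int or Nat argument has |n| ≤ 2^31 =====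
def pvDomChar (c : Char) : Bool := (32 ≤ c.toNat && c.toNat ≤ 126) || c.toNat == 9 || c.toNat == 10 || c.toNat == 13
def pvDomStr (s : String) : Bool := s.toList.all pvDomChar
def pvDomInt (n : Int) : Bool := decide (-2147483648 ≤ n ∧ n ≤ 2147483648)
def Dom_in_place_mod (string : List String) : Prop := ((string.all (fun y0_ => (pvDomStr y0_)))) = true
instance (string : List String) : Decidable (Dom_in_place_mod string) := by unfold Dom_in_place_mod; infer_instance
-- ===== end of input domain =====

-- B replaces A's while loop of in-place deletions with one-step backtracking by a single
-- left-to-right stack pass; equivalence is about the RETURN value (Python A mutates its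
-- argument in place; Python B performs the same final mutation via string[:] = out).

-- ===== PORT A =====
-- A's while loop as recursion on (s, i).  The loop is total because the measure 2*|s| - i
-- drops by at least 1 in every branch; fuel = 2*|s| bounds the number of iterations, so the
-- fuel-0 case is never reached from in_place_mod (proved in pv_loop_main below).
def in_place_mod_loop (fuel : Nat) (s : List String) (i : Nat) : List String :=
  match fuel with
  | 0 => s
  | fuel + 1 =>
    if h : i < s.length then
      if s[i] = "c" then
        -- del string[i]; back up if the element now before position i is "a"
        if 1 ≤ i ∧ (s.eraseIdx i)[i-1]? = some "a" then
          in_place_mod_loop fuel (s.eraseIdx i) (i-1)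
        else
          in_place_mod_loop fuel (s.eraseIdx i) i
      else if s[i] = "a" ∧ s[i+1]? = some "b" then
        -- del string[i+1]; del string[i]; back up if the element now before position i is "a"
        if 1 ≤ i ∧ ((s.eraseIdx (i+1)).eraseIdx i)[i-1]? = some "a" then
          in_place_mod_loop fuel ((s.eraseIdx (i+1)).eraseIdx i) (i-1)
        else
          in_place_mod_loop fuel ((s.eraseIdx (i+1)).eraseIdx i) i
      else
        in_place_mod_loop fuel s (i+1)
    else s

def in_place_mod (string : List String) : List String :=
  in_place_mod_loop (2 * string.length) string 0

-- ===== PORT B =====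
-- one fold step of B's stack pass: skip "c"; "b" pops a trailing "a"; otherwise push.
def in_place_mod_step (out : List String) (ch : String) : List String :=
  if ch = "c" then out
  else if ch = "b" ∧ out ≠ [] ∧ out.getLast? = some "a" then out.dropLast
  else out ++ [ch]

def in_place_mod_alt (string : List String) : List String :=
  string.foldl in_place_mod_step []

-- ===== PRECONDITION & SPEC =====
def Spec_in_place_mod (string : List String) (out : List String) : Prop := out = in_place_mod_alt string
instance (string : List String) (out : List String) : Decidable (Spec_in_place_mod string out) := by unfold Spec_in_place_mod; infer_instance

-- ===== CLAIM (what is proved, stated in full; the proofs are below) =====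
def Claim_equal_in_place_mod : Prop := ∀ (string : List String), Dom_in_place_mod string → Spec_in_place_mod string (in_place_mod string)

-- ===== LEMMAS AND PROOFS =====

-- "no a-b adjacency" relation on neighbours
def pvR (x y : String) : Prop := ¬(x = "a" ∧ y = "b")

lemma pv_eraseIdx_append (l₁ l₂ : List String) (k : Nat) :
    (l₁ ++ l₂).eraseIdx (l₁.length + k) = l₁ ++ l₂.eraseIdx k := by
  induction l₁ with
  | nil => simp
  | cons a t ih => simp [Nat.succ_add, ih]

lemma pv_step_c (out : List String) : in_place_mod_step out "c" = out := by
  simp [in_place_mod_step]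

lemma pv_step_push (out : List String) (x : String) (hc : x ≠ "c")
    (hab : ¬(out.getLast? = some "a" ∧ x = "b")) :
    in_place_mod_step out x = out ++ [x] := by
  unfold in_place_mod_step
  rw [if_neg hc, if_neg]
  rintro ⟨hb, _, hl⟩; exact hab ⟨hl, hb⟩

lemma pv_step_pop (out : List String) (h : out.getLast? = some "a") :
    in_place_mod_step out "b" = out.dropLast := by
  unfold in_place_mod_step
  rw [if_neg (by decide), if_pos]
  exact ⟨rfl, by rintro rfl; simp at h, h⟩

-- fold over a reduced list from a compatible accumulator only appends
lemma pv_fold_reduced (p : List String) (hc : ∀ x ∈ p, x ≠ "c") (hab : List.IsChain pvR p) :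
    ∀ acc : List String, ¬(acc.getLast? = some "a" ∧ p.head? = some "b") →
      p.foldl in_place_mod_step acc = acc ++ p := by
  induction p with
  | nil => intro acc _; simp
  | cons x t ih =>
    intro acc hacc
    have hx : x ≠ "c" := hc x (by simp)
    have h1 : in_place_mod_step acc x = acc ++ [x] :=
      pv_step_push acc x hx (by intro ⟨hl, hb⟩; exact hacc ⟨hl, by simp [hb]⟩)
    have hchain := (List.isChain_cons.mp hab)
    have ht : t.foldl in_place_mod_step (acc ++ [x]) = (acc ++ [x]) ++ t := by
      refine ih (fun y hy => hc y (by simp [hy])) hchain.2 (acc ++ [x]) ?_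
      rintro ⟨hl, hh⟩
      simp at hl
      cases t with
      | nil => simp at hh
      | cons y u =>
        simp at hh
        exact hchain.1 y (by simp) ⟨hl, hh⟩
    simp only [List.foldl_cons, h1, ht, List.append_assoc, List.singleton_append]

-- deleting a "c" does not change the fold
lemma pv_fold_erase_c (p r : List String) (acc : List String) :
    (p ++ "c" :: r).foldl in_place_mod_step acc = (p ++ r).foldl in_place_mod_step acc := by
  simp [List.foldl_append, pv_step_c]

-- deleting an adjacent "a","b" pair does not change the fold
lemma pv_fold_erase_ab (p r : List String) (acc : List String) :
    (p ++ "a" :: "b" :: r).foldl in_place_mod_step acc = (p ++ r).foldl in_place_mod_step acc := by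
  have h1 : in_place_mod_step (p.foldl in_place_mod_step acc) "a"
      = p.foldl in_place_mod_step acc ++ ["a"] :=
    pv_step_push _ _ (by decide) (by rintro ⟨_, h⟩; exact absurd h (by decide))
  have h2 : in_place_mod_step (p.foldl in_place_mod_step acc ++ ["a"]) "b"
      = p.foldl in_place_mod_step acc := by
    rw [pv_step_pop _ (by simp)]; simp
  simp [List.foldl_append, h1, h2]

-- main loop invariant: at state (p ++ r, |p|) with reduced prefix p and no a-b boundary,
-- the loop computes the stack fold of the whole list
lemma pv_loop_main (n : Nat) : ∀ (p r : List String),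
    p.length + 2 * r.length ≤ n →
    (∀ x ∈ p, x ≠ "c") → List.IsChain pvR p →
    ¬(p.getLast? = some "a" ∧ r.head? = some "b") →
    in_place_mod_loop n (p ++ r) p.length = (p ++ r).foldl in_place_mod_step [] := by
  induction n with
  | zero =>
    intro p r hn _ _ _
    obtain rfl : p = [] := List.length_eq_zero_iff.mp (by omega)
    obtain rfl : r = [] := List.length_eq_zero_iff.mp (by omega)
    simp [in_place_mod_loop]
  | succ n ih =>
    intro p r hn hc hab hbd
    cases r with
    | nil =>
      rw [in_place_mod_loop, dif_neg (by simp)]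
      rw [List.append_nil, pv_fold_reduced p hc hab [] (by simp)]
      simp
    | cons x t =>
      have hlt : p.length < (p ++ x :: t).length := by simp
      have hget : (p ++ x :: t)[p.length] = x := by
        rw [List.getElem_append_right (Nat.le_refl _)]
        simp
      have herase : (p ++ x :: t).eraseIdx p.length = p ++ t := by
        have := pv_eraseIdx_append p (x :: t) 0
        simpa using this
      -- the backtrack test reads p.getLast? (when p ≠ [])
      have hback : ∀ q : List String, p ≠ [] →
          (p ++ q)[p.length - 1]? = p.getLast? := by
        intro q hpne
        cases p with
        | nil => exact absurd rfl hpne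
        | cons a u =>
          rw [List.getElem?_append_left (by simp)]
          rw [List.getLast?_eq_getElem?]
      rw [in_place_mod_loop, dif_pos hlt]
      simp only [hget, herase]
      by_cases hxc : x = "c"
      · subst hxc
        rw [if_pos rfl, pv_fold_erase_c p t []]
        by_cases hbt : 1 ≤ p.length ∧ (p ++ t)[p.length - 1]? = some "a"
        · -- backtrack: p ends in "a"
          rw [if_pos hbt]
          have hpne : p ≠ [] := by rintro rfl; simp at hbt
          have hlast : p.getLast? = some "a" := by rw [← hback t hpne]; exact hbt.2
          obtain ⟨q, rfl⟩ : ∃ q, p = q ++ ["a"] := List.getLast?_eq_some_iff.mp hlast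
          have hch := List.isChain_append.mp hab
          have hg := ih q ("a" :: t) (by simp at hn ⊢; omega)
            (fun y hy => hc y (by simp [hy])) hch.1
            (by rintro ⟨_, hh⟩; simp at hh)
          simp only [List.append_assoc, List.singleton_append] at hg ⊢
          simpa using hg
        · rw [if_neg hbt]
          exact ih p t (by simp at hn ⊢; omega) hc hab (by
            rintro ⟨hl, hh⟩
            have hpne : p ≠ [] := by rintro rfl; simp at hl
            exact hbt ⟨by have := List.length_pos_of_ne_nil hpne; omega,
              by rw [hback t hpne]; exact hl⟩)
      · rw [if_neg hxc]
        by_cases hpair : x = "a" ∧ (p ++ x :: t)[p.length + 1]? = some "b"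
        · obtain ⟨rfl, hb⟩ := hpair
          rw [if_pos ⟨rfl, hb⟩]
          obtain ⟨u, rfl⟩ : ∃ u, t = "b" :: u := by
            rw [List.getElem?_append_right (by omega)] at hb
            simp at hb
            cases t with
            | nil => simp at hb
            | cons y u => simp at hb; exact ⟨u, by rw [hb]⟩
          have he2 : ((p ++ "a" :: "b" :: u).eraseIdx (p.length + 1)).eraseIdx p.length
              = p ++ u := by
            rw [pv_eraseIdx_append p ("a" :: "b" :: u) 1]
            have := pv_eraseIdx_append p ("a" :: u) 0
            simpa using this
          rw [he2, pv_fold_erase_ab p u []]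
          by_cases hbt : 1 ≤ p.length ∧ (p ++ u)[p.length - 1]? = some "a"
          · rw [if_pos hbt]
            have hpne : p ≠ [] := by rintro rfl; simp at hbt
            have hlast : p.getLast? = some "a" := by rw [← hback u hpne]; exact hbt.2
            obtain ⟨q, rfl⟩ : ∃ q, p = q ++ ["a"] := List.getLast?_eq_some_iff.mp hlast
            have hch := List.isChain_append.mp hab
            have hg := ih q ("a" :: u) (by simp at hn ⊢; omega)
              (fun y hy => hc y (by simp [hy])) hch.1
              (by rintro ⟨_, hh⟩; simp at hh)
            simp only [List.append_assoc, List.singleton_append] at hg ⊢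
            simpa using hg
          · rw [if_neg hbt]
            exact ih p u (by simp at hn ⊢; omega) hc hab (by
              rintro ⟨hl, hh⟩
              have hpne : p ≠ [] := by rintro rfl; simp at hl
              exact hbt ⟨by have := List.length_pos_of_ne_nil hpne; omega,
                by rw [hback u hpne]; exact hl⟩)
        · rw [if_neg hpair]
          have hbd' : ¬(p.getLast? = some "a" ∧ x = "b") := by
            rintro ⟨hl, rfl⟩; exact hbd ⟨hl, by simp⟩
          have hstep : p ++ x :: t = (p ++ [x]) ++ t := by simp
          have hlen : p.length + 1 = (p ++ [x]).length := by simp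
          rw [hstep, hlen]
          refine ih (p ++ [x]) t (by simp at hn ⊢; omega) ?_ ?_ ?_
          · intro y hy
            rcases List.mem_append.mp hy with h | h
            · exact hc y h
            · simp at h; subst h; exact hxc
          · rw [List.isChain_append]
            refine ⟨hab, by simp, ?_⟩
            intro a ha b hb
            simp at hb; subst hb
            exact fun hh => hbd' ⟨hh.1 ▸ Option.mem_def.mp ha, hh.2⟩
          · rintro ⟨hl, hh⟩
            simp at hl
            apply hpair
            refine ⟨hl, ?_⟩
            rw [List.getElem?_append_right (by omega)]
            cases t with
            | nil => simp at hh
            | cons y u => simp at hh ⊢; exact hh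

-- ===== VERDICT (by name: the statement is the Claim_ definition above) =====
theorem in_place_mod_spec : Claim_equal_in_place_mod := by
  intro s _
  unfold Spec_in_place_mod in_place_mod in_place_mod_alt
  have := pv_loop_main (2 * s.length) [] s (by simp) (by simp) (by simp) (by simp)
  simpa using this
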